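-- pv_equiv track=rewrite | github.com/taltechnlp/est-asr-ui | scripts/normalize_peaks.py | deinterleave
-- ===== SOURCE A (Python) =====
-- def deinterleave(data, channelCount):
--     # first step is to separate the values for each audio channel and min/max value pair, hence we get an array with channelCount * 2 arrays
--     deinterleaved = [data[idx::channelCount * 2] for idx in range(channelCount * 2)]
--     new_data = []
--
--     # this second step combines each min and max value again in one array so we have one array for each channel
--     for ch in range(channelCount):
--         idx1 = 2 * ch
--         idx2 = 2 * ch + 1
--         ch_data = [None] * (len(deinterleaved[idx1]) + len(deinterleaved[idx2]))
--         ch_data[::2] = deinterleaved[idx1]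
--         ch_data[1::2] = deinterleaved[idx2]
--         new_data.append(ch_data)
--     return new_data
-- ===== SOURCE B (Python) =====
-- def deinterleave(data, channelCount):
--     # One strided scan of data per channel; no intermediate deinterleaved sub-streams.
--     n = len(data)
--     new_data = []
--     for ch in range(channelCount):
--         ch_data = []
--         pos = 2 * ch
--         while pos < n:
--             ch_data.append(data[pos])
--             if pos + 1 < n:
--                 ch_data.append(data[pos + 1])
--             pos += 2 * channelCount
--         new_data.append(ch_data)
--     return new_data
-- ===== Notes on version B (the rewrite author's own statement) =====
-- stated objective: simpler
-- what changed: Replaced A's build of 2*channelCount extended-slice sub-streams followed by two extended-slice re-interleaving assignments per channel with a single direct strided walk over data per channel that emits each min/max pair in place, building no intermediate lists.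
import Mathlib
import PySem

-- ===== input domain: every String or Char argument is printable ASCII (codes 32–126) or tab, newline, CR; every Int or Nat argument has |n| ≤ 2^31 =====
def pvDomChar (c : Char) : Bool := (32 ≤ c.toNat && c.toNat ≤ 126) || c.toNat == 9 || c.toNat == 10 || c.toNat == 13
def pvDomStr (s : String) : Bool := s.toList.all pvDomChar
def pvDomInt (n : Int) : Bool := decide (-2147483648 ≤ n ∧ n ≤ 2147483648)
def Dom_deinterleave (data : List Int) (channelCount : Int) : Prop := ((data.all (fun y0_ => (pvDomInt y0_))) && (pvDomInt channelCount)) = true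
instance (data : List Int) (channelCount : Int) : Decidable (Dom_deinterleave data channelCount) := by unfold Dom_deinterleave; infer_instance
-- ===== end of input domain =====

-- B replaces A's slice-then-reinterleave (2*channelCount extended slices plus two
-- extended-slice assignments per channel) by one direct strided walk of data per
-- channel (objective: simpler decomposition; a timing run measured B faster by a
-- constant factor — no intermediate lists are built).

-- ===== PORT A =====

-- transcription of "ch_data[::2] = xs; ch_data[1::2] = ys": even slots from xs, odd
-- slots from ys (exact here because by construction len xs - len ys ∈ {0,1}, so the
-- slice-assignment lengths always match and no ValueError is reachable)
def pvWeave : List Int → List Int → List Int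
  | [], ys => ys
  | x :: xs, ys => x :: pvWeave ys xs
termination_by xs ys => xs.length + ys.length

def deinterleave (data : List Int) (channelCount : Int) : List (List Int) :=
  -- deinterleaved = [data[idx::channelCount*2] for idx in range(channelCount*2)]
  -- (idx ∈ range(channelCount*2) forces channelCount*2 > 0, so slice? never returns none; .getD [] is unreachable)
  let deinterleaved := (PySem.List.pyRange 0 (channelCount * 2)).map
    (fun idx => (PySem.List.slice? data (some idx) none (channelCount * 2)).getD [])
  -- for ch in range(channelCount): … new_data.append(ch_data)
  (PySem.List.pyRange 0 channelCount).map (fun ch =>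
    let idx1 := 2 * ch
    let idx2 := 2 * ch + 1
    -- deinterleaved[idx1], deinterleaved[idx2]: in range by construction, default unreachable
    pvWeave (PySem.List.pyGetD deinterleaved idx1 []) (PySem.List.pyGetD deinterleaved idx2 []))

-- ===== PORT B =====

-- the while loop of Source B: while pos < n: append data[pos]; append data[pos+1] if
-- pos+1 < n; pos += stride.  fuel = n+1 bounds the iteration count (stride ≥ 2 at
-- every call site, so fuel never runs out on a reachable call).
def pvWalk (data : List Int) (stride : Nat) (pos : Nat) : Nat → List Int
  | 0 => []
  | fuel + 1 =>
    if h : pos < data.length then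
      (data[pos] :: (if h2 : pos + 1 < data.length then [data[pos + 1]] else []))
        ++ pvWalk data stride (pos + stride) fuel
    else []

def deinterleave_alt (data : List Int) (channelCount : Int) : List (List Int) :=
  (PySem.List.pyRange 0 channelCount).map (fun ch =>
    pvWalk data (2 * channelCount).toNat (2 * ch).toNat (data.length + 1))

-- ===== PRECONDITION & SPEC =====
def Spec_deinterleave (data : List Int) (channelCount : Int) (out : List (List Int)) : Prop := out = deinterleave_alt data channelCount
instance (data : List Int) (channelCount : Int) (out : List (List Int)) : Decidable (Spec_deinterleave data channelCount out) := by unfold Spec_deinterleave; infer_instance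

-- ===== CLAIM (what is proved, stated in full; the proofs are below) =====
def Claim_equal_deinterleave : Prop := ∀ (data : List Int) (channelCount : Int), Dom_deinterleave data channelCount → Spec_deinterleave data channelCount (deinterleave data channelCount)

-- ===== LEMMAS AND PROOFS =====

-- elements of xs at indices p, p+(s+1), p+2(s+1), … (the stream data[p::s+1])
def pvStrided (xs : List Int) (s : Nat) (pos : Nat) : List Int :=
  if h : pos < xs.length then xs[pos] :: pvStrided xs s (pos + s + 1) else []
termination_by xs.length - pos

theorem pvStrided_nil (xs : List Int) (s pos : Nat) (h : xs.length ≤ pos) :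
    pvStrided xs s pos = [] := by
  unfold pvStrided; simp [Nat.not_lt.mpr h]

-- ceil division step for the slice element count
theorem pvCnt_step (n p s : Nat) (h : p < n) :
    (n - p + (s + 1) - 1) / (s + 1)
      = (if p + s + 1 < n then (n - (p + s + 1) + (s + 1) - 1) / (s + 1) else 0) + 1 := by
  have h1 : n - p + (s + 1) - 1 = (n - p - 1) + (s + 1) := by omega
  rw [h1, Nat.add_div_right _ (Nat.succ_pos s)]
  split_ifs with h2
  · have : n - (p + s + 1) + (s + 1) - 1 = n - p - 1 := by omega
    rw [this]
  · have : n - p - 1 < s + 1 := by omega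
    rw [Nat.div_eq_of_lt this]

-- the filterMap-over-range form of a positive-step slice equals pvStrided
theorem pvFilterMap_strided (xs : List Int) (s : Nat) :
    ∀ (fuel p : Nat), xs.length - p < fuel →
      List.filterMap (fun (k : Nat) => xs[((p : Int) + ((s : Int) + 1) * (k : Int)).toNat]?)
        (List.range (if (p : Int) < (xs.length : Int)
          then (((xs.length : Int) - (p : Int) + ((s : Int) + 1) - 1) / ((s : Int) + 1)).toNat
          else 0))
      = pvStrided xs s p := by
  intro fuel
  induction fuel with
  | zero => intro p hp; omega
  | succ f ih =>
    intro p hp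
    by_cases hlt : p < xs.length
    · have hplt : (p : Int) < (xs.length : Int) := by exact_mod_cast hlt
      rw [if_pos hplt]
      have hcast : (((xs.length : Int) - (p : Int) + ((s : Int) + 1) - 1) / ((s : Int) + 1)).toNat
          = (xs.length - p + (s + 1) - 1) / (s + 1) := by
        have h1 : ((xs.length : Int) - (p : Int) + ((s : Int) + 1) - 1)
            = ((xs.length - p + (s + 1) - 1 : Nat) : Int) := by omega
        rw [h1, show ((s:Int)+1) = ((s+1:Nat):Int) by omega, ← Int.natCast_ediv,
          Int.toNat_natCast]
      rw [hcast, pvCnt_step xs.length p s hlt, List.range_succ_eq_map]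
      have h0 : xs[((p : Int) + ((s : Int) + 1) * ((0 : Nat) : Int)).toNat]? = some xs[p] := by
        simp [List.getElem?_eq_getElem hlt]
      simp only [List.filterMap_cons, List.filterMap_map, h0]
      conv_rhs => rw [pvStrided, dif_pos hlt]
      congr 1
      have harg : ((fun (k : Nat) => xs[((p : Int) + ((s : Int) + 1) * (k : Int)).toNat]?) ∘ Nat.succ)
          = (fun (k : Nat) => xs[(((p + s + 1 : Nat) : Int) + ((s : Int) + 1) * (k : Int)).toNat]?) := by
        funext k
        simp only [Function.comp]
        congr 1
        push_cast
        ring_nf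
      rw [harg]
      have hif : (if p + s + 1 < xs.length
            then (xs.length - (p + s + 1) + (s + 1) - 1) / (s + 1) else 0)
          = (if ((p + s + 1 : Nat) : Int) < (xs.length : Int)
            then (((xs.length : Int) - ((p + s + 1 : Nat) : Int) + ((s : Int) + 1) - 1)
              / ((s : Int) + 1)).toNat
            else 0) := by
        by_cases h2 : p + s + 1 < xs.length
        · rw [if_pos h2, if_pos (by exact_mod_cast h2)]
          have h3 : ((xs.length : Int) - ((p + s + 1 : Nat) : Int) + ((s : Int) + 1) - 1)
              = ((xs.length - (p + s + 1) + (s + 1) - 1 : Nat) : Int) := by omega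
          rw [h3, show ((s:Int)+1) = ((s+1:Nat):Int) by omega, ← Int.natCast_ediv,
            Int.toNat_natCast]
        · rw [if_neg h2, if_neg (by exact_mod_cast h2)]
      rw [hif, ih (p + s + 1) (by omega)]
    · rw [if_neg (by exact_mod_cast hlt), List.range_zero, List.filterMap_nil,
        pvStrided_nil xs s p (Nat.not_lt.mp hlt)]

-- a positive-step slice data[a::s+1] is the pvStrided stream
theorem pvSlice_eq_strided (xs : List Int) (a s : Nat) :
    PySem.List.slice? xs (some (a : Int)) none ((s : Int) + 1) = some (pvStrided xs s a) := by
  unfold PySem.List.slice? PySem.List.sliceIndices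
  have hstep : ¬ ((s : Int) + 1 = 0) := by omega
  have hneg : ¬ ((s : Int) + 1 < 0) := by omega
  have ha : ¬ ((a : Int) < 0) := by omega
  simp only [hstep, hneg, ha, if_false]
  have hstart : min (a : Int) (xs.length : Int) = ((min a xs.length : Nat) : Int) := by
    push_cast; omega
  rw [hstart]
  have heq : pvStrided xs s (min a xs.length) = pvStrided xs s a := by
    by_cases hle : a ≤ xs.length
    · rw [Nat.min_eq_left hle]
    · rw [pvStrided_nil xs s _ (by omega), pvStrided_nil xs s a (by omega)]
  rw [← heq, ← pvFilterMap_strided xs s (xs.length + 1) (min a xs.length) (by omega),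
    if_pos (show (0 : Int) < (s : Int) + 1 by omega)]

-- the strided while loop is the weave of the two strided streams
theorem pvWalk_eq_weave (xs : List Int) (s : Nat) :
    ∀ (fuel p : Nat), xs.length - p < fuel →
      pvWalk xs (s + 1) p fuel = pvWeave (pvStrided xs s p) (pvStrided xs s (p + 1)) := by
  intro fuel
  induction fuel with
  | zero => intro p hp; omega
  | succ f ih =>
    intro p hp
    unfold pvWalk
    by_cases h : p < xs.length
    · rw [dif_pos h]
      conv_rhs => rw [pvStrided, dif_pos h]
      rw [pvWeave]
      by_cases h2 : p + 1 < xs.length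
      · rw [dif_pos h2]
        conv_rhs => rw [pvStrided, dif_pos h2]
        rw [pvWeave]
        have harg : p + 1 + s + 1 = p + (s + 1) + 1 := by omega
        rw [harg, ih (p + (s + 1)) (by omega)]
        simp [Nat.add_assoc]
      · rw [dif_neg h2]
        rw [pvStrided_nil xs s (p + 1) (by omega)]
        rw [pvWeave]
        rw [pvStrided_nil xs s (p + s + 1) (by omega)]
        have : xs.length ≤ p + (s + 1) := by omega
        cases f with
        | zero => omega
        | succ f' =>
          unfold pvWalk
          rw [dif_neg (by omega)]
          simp
    · rw [dif_neg h]
      rw [pvStrided_nil xs s p (by omega), pvStrided_nil xs s (p + 1) (by omega)]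
      simp [pvWeave]

-- ===== VERDICT (by name: the statement is the Claim_ definition above) =====
theorem deinterleave_spec : Claim_equal_deinterleave := by
  intro data cc _
  unfold Spec_deinterleave deinterleave deinterleave_alt
  apply List.map_congr_left
  intro ch hch
  have hmem := (PySem.List.mem_pyRange_one).mp hch
  -- ch = ↑j, cc = ↑c with j < c
  obtain ⟨j, hj⟩ : ∃ j : Nat, ch = (j : Int) := ⟨ch.toNat, by omega⟩
  obtain ⟨c, hc⟩ : ∃ c : Nat, cc = (c : Int) := ⟨cc.toNat, by omega⟩
  have hjc : j < c := by omega
  subst hj hc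
  dsimp only
  -- resolve the two pyGetD lookups into the deinterleaved list of slices
  rw [show ((c : Int) * 2) = ((2 * c : Nat) : Int) by push_cast; ring,
    show (2 * (j : Int)) = ((2 * j : Nat) : Int) by push_cast; ring,
    show (((2 * j : Nat) : Int) + 1) = ((2 * j + 1 : Nat) : Int) by push_cast; ring,
    PySem.List.pyGetD_map_pyRange _ (2 * c) (2 * j) [] (by omega),
    PySem.List.pyGetD_map_pyRange _ (2 * c) (2 * j + 1) [] (by omega)]
  -- each slice is a strided stream (step 2*c = (2*c-1)+1 > 0)
  rw [show ((2 * c : Nat) : Int) = ((2 * c - 1 : Nat) : Int) + 1 by omega,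
    pvSlice_eq_strided data (2 * j) (2 * c - 1),
    pvSlice_eq_strided data (2 * j + 1) (2 * c - 1)]
  simp only [Option.getD_some]
  -- the strided while loop computes the same weave
  rw [show ((2 * (c : Int)).toNat) = 2 * c by omega,
    show ((((2 * j : Nat) : Int)).toNat) = 2 * j by omega]
  have hw := pvWalk_eq_weave data (2 * c - 1) (data.length + 1) (2 * j) (by omega)
  rw [show 2 * c - 1 + 1 = 2 * c by omega] at hw
  rw [hw]
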